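-- pv_equiv track=rewrite | github.com/midouest/advent-of-code-2022 | advent/day08.py | find_visible_x_along
-- ===== SOURCE A (Python) =====
-- def find_visible_x_along(lines, y, start, stop, step):
--     found = set()
--     line = lines[y]
--     prev = line[start - step]
--     for x in range(start, stop, step):
--         tree = line[x]
--         found.add((x, y))
--         if tree >= prev:
--             break
--     return found
-- ===== SOURCE B (Python) =====
-- def find_visible_x_along(lines, y, start, stop, step):
--     line = lines[y]
--     prev = line[start - step]
--     xs = range(start, stop, step)
--
--     def go(lo, hi):
--         # positions xs[lo:hi]; returns (visible set, whether a blocking tree stopped the scan)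
--         if lo >= hi:
--             return set(), False
--         if hi - lo == 1:
--             x = xs[lo]
--             return {(x, y)}, line[x] >= prev
--         mid = (lo + hi) // 2
--         left, blocked = go(lo, mid)
--         if blocked:
--             return left, True
--         right, rblocked = go(mid, hi)
--         return left | right, rblocked
--
--     return go(0, len(xs))[0]
-- ===== Notes on version B (the rewrite author's own statement) =====
-- stated objective: alternative
-- what changed: A accumulates positions in a single linear loop with an in-loop break on the first blocking tree; B recursively splits the index range in half, each call returning a (visible set, blocked flag) pair, discarding the right half when the left half blocked and merging the two sets otherwise.
import Mathlib
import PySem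

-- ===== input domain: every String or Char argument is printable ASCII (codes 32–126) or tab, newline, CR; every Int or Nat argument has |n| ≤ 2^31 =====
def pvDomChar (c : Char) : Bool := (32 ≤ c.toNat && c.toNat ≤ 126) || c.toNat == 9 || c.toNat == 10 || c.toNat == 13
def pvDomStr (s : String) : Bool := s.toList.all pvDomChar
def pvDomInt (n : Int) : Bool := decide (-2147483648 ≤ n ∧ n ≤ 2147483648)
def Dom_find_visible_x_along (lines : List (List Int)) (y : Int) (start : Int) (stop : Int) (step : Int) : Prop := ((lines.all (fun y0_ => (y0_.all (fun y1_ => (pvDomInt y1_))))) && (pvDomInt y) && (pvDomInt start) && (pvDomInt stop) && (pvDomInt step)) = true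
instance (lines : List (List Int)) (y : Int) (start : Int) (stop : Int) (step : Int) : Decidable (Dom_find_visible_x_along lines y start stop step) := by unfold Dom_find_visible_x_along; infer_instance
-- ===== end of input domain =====

-- B replaces A's single accumulate-and-break loop by a divide-and-conquer recursion
-- over the index range that returns (visible set, blocked flag) and merges halves
-- (alternative decomposition, same cost).


-- ===== PORT A =====
-- the 'for x in range(...): tree = line[x]; found.add((x, y)); if tree >= prev: break' loop
def findVisLoopA (line : List Int) (prev : Int) (y : Int) : List Int → PySem.Set (Int × Int) → PySem.Set (Int × Int)
  | [], found => found
  | x :: rest, found =>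
    match PySem.List.pyGet? line x with
    | none => found  -- IndexError in Python; excluded by Pre_
    | some tree =>
      let found' := PySem.Set.add found (x, y)
      if prev ≤ tree then found' else findVisLoopA line prev y rest found'

def find_visible_x_along (lines : List (List Int)) (y : Int) (start : Int) (stop : Int) (step : Int) : List (Int × Int) :=
  match PySem.List.pyGet? lines y with
  | none => []  -- IndexError; excluded by Pre_
  | some line =>
    match PySem.List.pyGet? line (start - step) with
    | none => []  -- IndexError; excluded by Pre_
    | some prev =>
      findVisLoopA line prev y (PySem.List.pyRange start stop step) PySem.Set.empty

-- ===== PORT B =====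
-- the inner 'go(lo, hi)' divide-and-conquer of Source B: positions xs[lo:hi],
-- returns (visible set, blocked flag); lookups happen left to right.
def goVisB (line : List Int) (prev : Int) (y : Int) (xs : List Int) (lo hi : Nat) : PySem.Set (Int × Int) × Bool :=
  if _hle : hi ≤ lo then (PySem.Set.empty, false)
  else if _h1 : hi - lo = 1 then
    -- x = xs[lo]; lo is always in range for the top-level call's slices
    let x := (PySem.List.pyGet? xs (lo : Int)).getD 0
    match PySem.List.pyGet? line x with
    | none => (PySem.Set.ofList [(x, y)], true)  -- IndexError in Python; excluded by Pre_
    | some tree => (PySem.Set.ofList [(x, y)], decide (prev ≤ tree))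
  else
    let mid := (lo + hi) / 2
    let l := goVisB line prev y xs lo mid
    if l.2 then (l.1, true)
    else
      let r := goVisB line prev y xs mid hi
      (PySem.Set.union l.1 r.1, r.2)
termination_by hi - lo
decreasing_by all_goals omega

def find_visible_x_along_alt (lines : List (List Int)) (y : Int) (start : Int) (stop : Int) (step : Int) : List (Int × Int) :=
  match PySem.List.pyGet? lines y with
  | none => []  -- IndexError; excluded by Pre_
  | some line =>
    match PySem.List.pyGet? line (start - step) with
    | none => []  -- IndexError; excluded by Pre_
    | some prev =>
      let xs := PySem.List.pyRange start stop step
      (goVisB line prev y xs 0 xs.length).1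

-- ===== PRECONDITION & SPEC =====
-- Pre_ excludes exactly the inputs where the Python A raises: step = 0 (ValueError in
-- range), y or start-step out of range (IndexError), or some scanned position x hitting
-- an IndexError before the loop stops — i.e. every position whose predecessors were all
-- valid non-blocking trees must itself be a valid index.
def Pre_find_visible_x_along (lines : List (List Int)) (y : Int) (start : Int) (stop : Int) (step : Int) : Prop :=
  step ≠ 0 ∧
  ((PySem.List.pyGet? lines y).bind (fun line => PySem.List.pyGet? line (start - step))).isSome = true ∧
  (∀ i, i < (PySem.List.pyRange start stop step).length →
    (∀ k, k < i →
      ((PySem.List.pyGet? ((PySem.List.pyGet? lines y).getD [])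
          ((PySem.List.pyRange start stop step).getD k 0)).any
        (fun t => decide (t < ((PySem.List.pyGet? lines y).bind
            (fun line => PySem.List.pyGet? line (start - step))).getD 0))) = true) →
    (PySem.List.pyGet? ((PySem.List.pyGet? lines y).getD [])
        ((PySem.List.pyRange start stop step).getD i 0)).isSome = true)
instance (lines : List (List Int)) (y : Int) (start : Int) (stop : Int) (step : Int) : Decidable (Pre_find_visible_x_along lines y start stop step) := by unfold Pre_find_visible_x_along; infer_instance

def pvWitness_find_visible_x_along : List (List Int) × Int × Int × Int × Int := ([[3, 1, 2]], 0, 1, 3, 1)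

def Spec_find_visible_x_along (lines : List (List Int)) (y : Int) (start : Int) (stop : Int) (step : Int) (out : List (Int × Int)) : Prop := out = find_visible_x_along_alt lines y start stop step
instance (lines : List (List Int)) (y : Int) (start : Int) (stop : Int) (step : Int) (out : List (Int × Int)) : Decidable (Spec_find_visible_x_along lines y start stop step out) := by unfold Spec_find_visible_x_along; infer_instance

-- ===== CLAIM (what is proved, stated in full; the proofs are below) =====
def Claim_equal_find_visible_x_along : Prop := ∀ (lines : List (List Int)) (y : Int) (start : Int) (stop : Int) (step : Int), Dom_find_visible_x_along lines y start stop step → Pre_find_visible_x_along lines y start stop step → Spec_find_visible_x_along lines y start stop step (find_visible_x_along lines y start stop step)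

-- ===== LEMMAS AND PROOFS =====

-- the validity chain of Pre_, abstracted over the scanned list
def VisChain (line : List Int) (prev : Int) (xs : List Int) : Prop :=
  ∀ i, i < xs.length →
    (∀ k, k < i → ((PySem.List.pyGet? line (xs.getD k 0)).any (fun t => decide (t < prev))) = true) →
    (PySem.List.pyGet? line (xs.getD i 0)).isSome = true

-- sequential specification both ports are reduced to: the visible prefix and the blocked flag
def linVis (line : List Int) (prev : Int) (y : Int) : List Int → List (Int × Int) × Bool
  | [] => ([], false)
  | x :: rest =>
    match PySem.List.pyGet? line x with
    | none => ([(x, y)], true)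
    | some tree =>
      if prev ≤ tree then ([(x, y)], true)
      else
        let r := linVis line prev y rest
        ((x, y) :: r.1, r.2)

lemma visChain_tail {line : List Int} {prev x tree : Int} {rest : List Int}
    (h : VisChain line prev (x :: rest)) (hx : PySem.List.pyGet? line x = some tree)
    (hlt : tree < prev) : VisChain line prev rest := by
  intro i hi hk
  have := h (i + 1) (by simpa using Nat.succ_lt_succ hi)
  simp only [List.getD_cons_succ] at this
  apply this
  intro k hk1
  cases k with
  | zero => simp [hx, hlt]
  | succ k => simpa using hk k (by omega)

lemma mem_linVis {line : List Int} {prev y : Int} :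
    ∀ {l : List Int} {p : Int × Int}, p ∈ (linVis line prev y l).1 → p.2 = y ∧ p.1 ∈ l := by
  intro l
  induction l with
  | nil => intro p h; simp [linVis] at h
  | cons x rest ih =>
    intro p h
    simp only [linVis] at h
    cases hx : PySem.List.pyGet? line x with
    | none =>
      rw [hx] at h; simp at h; subst h; simp
    | some tree =>
      rw [hx] at h
      by_cases hge : prev ≤ tree
      · simp [hge] at h; subst h; simp
      · simp [hge] at h
        cases h with
        | inl h => subst h; simp
        | inr h => obtain ⟨h1, h2⟩ := ih h; exact ⟨h1, by simp [h2]⟩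

lemma nodup_linVis {line : List Int} {prev y : Int} :
    ∀ {l : List Int}, l.Nodup → ((linVis line prev y l).1).Nodup := by
  intro l
  induction l with
  | nil => intro _; simp [linVis]
  | cons x rest ih =>
    intro hnd
    simp only [List.nodup_cons] at hnd
    simp only [linVis]
    cases hx : PySem.List.pyGet? line x with
    | none => simp
    | some tree =>
      by_cases hge : prev ≤ tree
      · simp [hge]
      · simp only [hge, if_false]
        refine List.nodup_cons.mpr ⟨fun hmem => ?_, ih hnd.2⟩
        have := (mem_linVis hmem).2
        exact hnd.1 this

lemma linVis_append (line : List Int) (prev y : Int) (u v : List Int) :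
    linVis line prev y (u ++ v) =
      if (linVis line prev y u).2 then linVis line prev y u
      else ((linVis line prev y u).1 ++ (linVis line prev y v).1, (linVis line prev y v).2) := by
  induction u with
  | nil => simp [linVis]
  | cons x rest ih =>
    simp only [List.cons_append, linVis]
    cases hx : PySem.List.pyGet? line x with
    | none => simp
    | some tree =>
      by_cases hge : prev ≤ tree
      · simp [hge]
      · simp only [hge, if_false, ih]
        by_cases hb : (linVis line prev y rest).2
        · simp [hb]
        · simp [hb]

lemma set_add_of_not_mem {s : PySem.Set (Int × Int)} {p : Int × Int} (h : p ∉ s) :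
    PySem.Set.add s p = s ++ [p] := by
  simp only [PySem.Set.add, PySem.Set.contains]
  rw [if_neg]
  simp [h]

lemma foldl_add_of_disjoint :
    ∀ (t s : PySem.Set (Int × Int)), t.Nodup → (∀ p ∈ t, p ∉ s) →
      t.foldl PySem.Set.add s = s ++ t := by
  intro t
  induction t with
  | nil => intro s _ _; simp
  | cons p rest ih =>
    intro s hnd hdisj
    simp only [List.nodup_cons] at hnd
    simp only [List.foldl_cons]
    rw [set_add_of_not_mem (hdisj p (by simp))]
    rw [ih (s ++ [p]) hnd.2 (fun q hq => by
      simp only [List.mem_append, List.mem_singleton, not_or]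
      exact ⟨hdisj q (by simp [hq]), fun he => hnd.1 (he ▸ hq)⟩)]
    simp

-- injectivity of the range map: pyRange has no duplicates for step ≠ 0
lemma nodup_pyRange (a b s : Int) (hs : s ≠ 0) : (PySem.List.pyRange a b s).Nodup := by
  unfold PySem.List.pyRange
  rw [if_neg hs]
  refine List.Nodup.map ?_ (List.nodup_range)
  intro k1 k2 h
  have h' : s * (k1 : Int) = s * (k2 : Int) := by linarith
  have := mul_left_cancel₀ hs h'
  exact_mod_cast this

-- B's divide-and-conquer equals the sequential specification on the slice xs[lo:hi]
lemma goVisB_eq_linVis (line : List Int) (prev y : Int) (xs : List Int) (hnd : xs.Nodup) :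
    ∀ (n lo hi : Nat), hi - lo ≤ n → hi ≤ xs.length →
      goVisB line prev y xs lo hi = linVis line prev y ((xs.drop lo).take (hi - lo)) := by
  intro n
  induction n with
  | zero =>
    intro lo hi hle _
    have : hi ≤ lo := by omega
    rw [goVisB]
    simp [this, Nat.sub_eq_zero_of_le this, linVis, PySem.Set.empty]
  | succ n ih =>
    intro lo hi hle hlen
    by_cases hle0 : hi ≤ lo
    · rw [goVisB]
      simp [hle0, Nat.sub_eq_zero_of_le hle0, linVis, PySem.Set.empty]
    · by_cases h1 : hi - lo = 1
      · have hlo : lo < xs.length := by omega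
        have hget : PySem.List.pyGet? xs (lo : Int) = some xs[lo] := by
          rw [PySem.List.pyGet?_natCast xs lo, List.getElem?_eq_getElem hlo]
        have hseg : (xs.drop lo).take (hi - lo) = [xs[lo]] := by
          rw [h1, List.take_one, List.head?_drop, List.getElem?_eq_getElem hlo]; rfl
        rw [goVisB]
        simp only [dif_neg hle0, dif_pos h1, hseg, hget, Option.getD_some, linVis]
        cases hx : PySem.List.pyGet? line xs[lo] with
        | none => simp [PySem.Set.ofList, PySem.Set.add, PySem.Set.empty, PySem.Set.contains]
        | some tree =>
          by_cases hge : prev ≤ tree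
          · simp [hge, PySem.Set.ofList, PySem.Set.add, PySem.Set.empty, PySem.Set.contains]
          · simp [hge, PySem.Set.ofList, PySem.Set.add, PySem.Set.empty, PySem.Set.contains]
      · -- recursive case
        have h2 : lo + 2 ≤ hi := by omega
        set mid := (lo + hi) / 2 with hmid
        have hlt1 : lo < mid := by omega
        have hlt2 : mid < hi := by omega
        have hsplit : (xs.drop lo).take (hi - lo) =
            (xs.drop lo).take (mid - lo) ++ (xs.drop mid).take (hi - mid) := by
          have : hi - lo = (mid - lo) + (hi - mid) := by omega
          rw [this, List.take_add]
          congr 2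
          · rw [List.drop_drop]
            congr 1
            omega
        have hL := ih lo mid (by omega) (by omega)
        have hR := ih mid hi (by omega) hlen
        rw [goVisB]
        simp only [dif_neg hle0, dif_neg h1]
        rw [← hmid, hL, hR, hsplit, linVis_append]
        by_cases hb : (linVis line prev y ((xs.drop lo).take (mid - lo))).2
        · simp only [hb, if_true]
          rw [← hb]
        · simp only [hb, if_false, Bool.false_eq_true]
          have hndseg : (((xs.drop lo).take (mid - lo)) ++ ((xs.drop mid).take (hi - mid))).Nodup := by
            rw [← hsplit]
            exact ((List.take_sublist _ _).trans (List.drop_sublist _ _)).nodup hnd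
          have hdisj := (List.nodup_append.mp hndseg).2.2
          have hndR : ((xs.drop mid).take (hi - mid)).Nodup :=
            ((List.take_sublist _ _).trans (List.drop_sublist _ _)).nodup hnd
          have hfold : PySem.Set.union (linVis line prev y ((xs.drop lo).take (mid - lo))).1
                (linVis line prev y ((xs.drop mid).take (hi - mid))).1 =
              (linVis line prev y ((xs.drop lo).take (mid - lo))).1 ++
                (linVis line prev y ((xs.drop mid).take (hi - mid))).1 := by
            refine foldl_add_of_disjoint _ _ (nodup_linVis hndR) ?_
            intro p hpR hpL
            have h1R := mem_linVis hpR
            have h1L := mem_linVis hpL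
            exact hdisj _ h1L.2 _ h1R.2 rfl
          rw [hfold]

-- A's loop equals the sequential specification, under the validity chain
lemma loopA_eq_linVis (line : List Int) (prev y : Int) :
    ∀ (l : List Int) (s : PySem.Set (Int × Int)), VisChain line prev l → l.Nodup →
      (∀ p ∈ (linVis line prev y l).1, p ∉ s) →
      findVisLoopA line prev y l s = s ++ (linVis line prev y l).1 := by
  intro l
  induction l with
  | nil => intro s _ _ _; simp [findVisLoopA, linVis]
  | cons x rest ih =>
    intro s hch hnd hdisj
    simp only [List.nodup_cons] at hnd
    have h0 : (PySem.List.pyGet? line x).isSome = true := by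
      have := hch 0 (by simp) (by omega)
      simpa using this
    obtain ⟨tree, hx⟩ := Option.isSome_iff_exists.mp h0
    have hxy_lin : (x, y) ∈ (linVis line prev y (x :: rest)).1 := by
      simp only [linVis, hx]
      by_cases hge : prev ≤ tree
      · simp [hge]
      · simp [hge]
    have hxy_s : (x, y) ∉ s := hdisj _ hxy_lin
    by_cases hge : prev ≤ tree
    · simp [findVisLoopA, hx, hge, linVis, set_add_of_not_mem hxy_s]
    · have hlt : tree < prev := by omega
      simp only [findVisLoopA, hx, if_neg hge]
      rw [set_add_of_not_mem hxy_s]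
      have hlin : (linVis line prev y (x :: rest)).1 = (x, y) :: (linVis line prev y rest).1 := by
        simp [linVis, hx, hge]
      rw [ih (s ++ [(x, y)]) (visChain_tail hch hx hlt) hnd.2 ?_, hlin]
      · simp
      · intro p hp
        simp only [List.mem_append, List.mem_singleton, not_or]
        refine ⟨hdisj p (by rw [hlin]; simp [hp]), fun he => ?_⟩
        have := (mem_linVis hp).2
        rw [he] at this
        exact hnd.1 this

-- ===== VERDICT (by name: the statement is the Claim_ definition above) =====
theorem find_visible_x_along_spec : Claim_equal_find_visible_x_along := by
  intro lines y start stop step _ hpre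
  obtain ⟨hstep, hsome, hchain⟩ := hpre
  unfold Spec_find_visible_x_along find_visible_x_along find_visible_x_along_alt
  cases hl : PySem.List.pyGet? lines y with
  | none => simp [hl] at hsome
  | some line =>
    cases hp : PySem.List.pyGet? line (start - step) with
    | none => simp [hl, hp] at hsome
    | some prev =>
      simp only [hp]
      set xs := PySem.List.pyRange start stop step with hxs
      have hnd : xs.Nodup := nodup_pyRange start stop step hstep
      have hch : VisChain line prev xs := by
        intro i hi hk
        have := hchain i hi
        simp only [hl, hp, Option.getD_some, Option.bind_some] at this
        exact this hk
      rw [loopA_eq_linVis line prev y xs PySem.Set.empty hch hnd (by simp [PySem.Set.empty])]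
      rw [goVisB_eq_linVis line prev y xs hnd xs.length 0 xs.length (by omega) le_rfl]
      simp [PySem.Set.empty]
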